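-- pv_equiv track=rewrite | github.com/AiENG07/Key-seeking | 01_通用字典/生日字典/birthday_dict_create.py | generate_birthday_dict
-- ===== SOURCE A (Python) =====
-- def is_leap_year(year):
--     """判断是否为闰年"""
--     return year % 4 == 0 and (year % 100 != 0 or year % 400 == 0)
--
-- def generate_birthday_dict(start_year=1900, end_year=2024):
--     birthday_list = []
--
--     for year in range(start_year, end_year + 1):
--         for month in range(1, 13):
--             if month == 2:
--                 # 二月份，闰年有29天，平年有28天
--                 day_range = range(1, 30) if is_leap_year(year) else range(1, 29)
--             elif month in [4, 6, 9, 11]: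
--                 # 4, 6, 9, 11月有30天
--                 day_range = range(1, 31)
--             else:
--                 # 其他月份有31天
--                 day_range = range(1, 32)
--
--             for day in day_range:
--                 date_str = f"{year:04d}{month:02d}{day:02d}"  # 格式化为YYYYMMDD
--                 birthday_list.append(date_str)
--
--     return birthday_list
-- ===== SOURCE B (Python) =====
-- def _days_in_month(year, month):
--     if month == 2:
--         return 29 if (year % 4 == 0 and (year % 100 != 0 or year % 400 == 0)) else 28
--     if month in (4, 6, 9, 11):
--         return 30
--     return 31
--
--
-- def generate_birthday_dict(start_year=1900, end_year=2024):
--     # Single sequential walk over consecutive dates (odometer with day/month carry)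
--     # instead of three nested loops with per-month range branching.
--     out = []
--     y, m, d = start_year, 1, 1
--     while y <= end_year:
--         out.append(f"{y:04d}{m:02d}{d:02d}")
--         if d < _days_in_month(y, m):
--             d += 1
--         elif m < 12:
--             m, d = m + 1, 1
--         else:
--             y, m, d = y + 1, 1, 1
--     return out
-- ===== Notes on version B (the rewrite author's own statement) =====
-- stated objective: alternative
-- what changed: Replaces the three nested year/month/day loops with explicit per-month day ranges by a single sequential walk over consecutive dates (an odometer loop that carries the day into the month and the month into the year).
import Mathlib
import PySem

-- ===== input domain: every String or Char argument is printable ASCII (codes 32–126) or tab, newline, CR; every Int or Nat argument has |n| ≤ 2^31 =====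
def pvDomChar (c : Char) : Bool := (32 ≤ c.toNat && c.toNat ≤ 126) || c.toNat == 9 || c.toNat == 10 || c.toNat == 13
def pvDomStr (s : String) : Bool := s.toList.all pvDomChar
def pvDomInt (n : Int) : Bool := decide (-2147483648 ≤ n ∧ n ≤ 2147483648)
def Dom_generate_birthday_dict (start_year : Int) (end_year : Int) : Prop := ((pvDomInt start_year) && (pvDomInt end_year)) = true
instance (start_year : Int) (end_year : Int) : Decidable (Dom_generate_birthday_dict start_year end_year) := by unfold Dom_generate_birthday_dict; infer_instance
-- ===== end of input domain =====

-- B replaces the three nested year/month/day loops by a single sequential walk over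
-- consecutive dates (an odometer with day/month carry); objective: alternative.

-- shared helper: f"{n:0wd}" (zero-padded decimal, sign counts towards the width)
def pyPad (w : Nat) (n : Int) : List Char :=
  if n < 0 then
    '-' :: (let s := PySem.Int.toChars (n.natAbs : Int)
            List.replicate (w - 1 - s.length) '0' ++ s)
  else
    let s := PySem.Int.toChars n
    List.replicate (w - s.length) '0' ++ s

-- shared helper: f"{year:04d}{month:02d}{day:02d}"
def fmtDate (y m d : Int) : String :=
  String.ofList (pyPad 4 y ++ pyPad 2 m ++ pyPad 2 d)

-- helper from A's module: is_leap_year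
def is_leap_year (year : Int) : Bool :=
  PySem.Int.mod year 4 == 0 && (PySem.Int.mod year 100 != 0 || PySem.Int.mod year 400 == 0)

-- ===== PORT A =====
-- A's per-month day range (the if/elif/else choosing day_range)
def dayRangeA (year month : Int) : List Int :=
  if month == 2 then
    (if is_leap_year year then PySem.List.pyRange 1 30 1 else PySem.List.pyRange 1 29 1)
  else if month ∈ ([4, 6, 9, 11] : List Int) then PySem.List.pyRange 1 31 1
  else PySem.List.pyRange 1 32 1

def generate_birthday_dict (start_year : Int) (end_year : Int) : List String :=
  (PySem.List.pyRange start_year (end_year + 1) 1).foldl (fun acc year =>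
    (PySem.List.pyRange 1 13 1).foldl (fun acc month =>
      (dayRangeA year month).foldl (fun acc day =>
        acc ++ [fmtDate year month day]) acc) acc) []

-- ===== PORT B =====
-- Source B's _days_in_month
def days_in_month (year month : Int) : Int :=
  if month == 2 then (if is_leap_year year then 29 else 28)
  else if month ∈ ([4, 6, 9, 11] : List Int) then 30
  else 31

-- Source B's while loop: emit the current date, then advance with day/month carry.
-- The Nat fuel only makes the recursion structural (totality guard); it is always sufficient.
def walkB : Nat → Int → Int → Int → Int → List String
  | 0, _, _, _, _ => []
  | fuel + 1, e, y, m, d =>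
    if y ≤ e then
      fmtDate y m d ::
        (if d < days_in_month y m then walkB fuel e y m (d + 1)
         else if m < 12 then walkB fuel e y (m + 1) 1
         else walkB fuel e (y + 1) 1 1)
    else []

def generate_birthday_dict_alt (start_year : Int) (end_year : Int) : List String :=
  walkB ((end_year + 1 - start_year).toNat * 600 + 600) end_year start_year 1 1

-- ===== PRECONDITION & SPEC =====
def Spec_generate_birthday_dict (start_year : Int) (end_year : Int) (out : List String) : Prop := out = generate_birthday_dict_alt start_year end_year
instance (start_year : Int) (end_year : Int) (out : List String) : Decidable (Spec_generate_birthday_dict start_year end_year out) := by unfold Spec_generate_birthday_dict; infer_instance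

-- ===== CLAIM (what is proved, stated in full; the proofs are below) =====
def Claim_equal_generate_birthday_dict : Prop := ∀ (start_year : Int) (end_year : Int), Dom_generate_birthday_dict start_year end_year → Spec_generate_birthday_dict start_year end_year (generate_birthday_dict start_year end_year)

-- ===== LEMMAS AND PROOFS =====

theorem days_in_month_bounds (y m : Int) : 28 ≤ days_in_month y m ∧ days_in_month y m ≤ 31 := by
  unfold days_in_month; split_ifs <;> omega

-- A's day range is exactly range(1, days_in_month+1)
theorem dayRangeA_eq (y m : Int) :
    dayRangeA y m = PySem.List.pyRange 1 (days_in_month y m + 1) 1 := by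
  unfold dayRangeA days_in_month
  split_ifs <;> norm_num

-- A as a flatMap over years and months
theorem A_eq (s e : Int) :
    generate_birthday_dict s e =
      (PySem.List.pyRange s (e + 1) 1).flatMap (fun y =>
        (PySem.List.pyRange 1 13 1).flatMap (fun m =>
          (PySem.List.pyRange 1 (days_in_month y m + 1) 1).map (fmtDate y m))) := by
  unfold generate_birthday_dict
  simp only [PySem.List.foldl_append_singleton_eq_map, PySem.List.foldl_append_eq_flatMap,
    dayRangeA_eq, List.nil_append]

-- measure of remaining work for the walk
def wMeasure (e y m d : Int) : Nat :=
  (e + 1 - y).toNat * 600 + (13 - m).toNat * 40 + (32 - d).toNat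

-- any fuel above the measure gives the same list
set_option maxRecDepth 4096 in
theorem walkB_stable : ∀ n e y m d, wMeasure e y m d < n →
    walkB n e y m d = walkB (n + 1) e y m d := by
  intro n
  induction n with
  | zero => intro e y m d h; exact absurd h (Nat.not_lt_zero _)
  | succ n ih =>
    intro e y m d h
    show walkB (n + 1) e y m d = walkB (n + 1 + 1) e y m d
    rw [walkB, walkB]
    by_cases hy : y ≤ e
    · simp only [if_pos hy]
      have hb := days_in_month_bounds y m
      by_cases hd : d < days_in_month y m
      · simp only [if_pos hd]
        rw [ih e y m (d + 1) (by unfold wMeasure at *; omega)]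
      · simp only [if_neg hd]
        by_cases hm : m < 12
        · simp only [if_pos hm]
          rw [ih e y (m + 1) 1 (by unfold wMeasure at *; omega)]
        · simp only [if_neg hm]
          rw [ih e (y + 1) 1 1 (by unfold wMeasure at *; omega)]
    · simp only [if_neg hy]

-- the day-level walk: consume days d..days_in_month, then carry
set_option maxRecDepth 4096 in
theorem walk_day (e y m : Int) (hy : y ≤ e) :
    ∀ k d n, 1 ≤ d → d ≤ days_in_month y m → (days_in_month y m - d).toNat = k →
      wMeasure e y m d < n →
      walkB n e y m d =
        (PySem.List.pyRange d (days_in_month y m + 1) 1).map (fmtDate y m) ++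
          (if m < 12 then walkB n e y (m + 1) 1 else walkB n e (y + 1) 1 1) := by
  intro k
  induction k with
  | zero =>
    intro d n h1 h2 hk hn
    have hd : d = days_in_month y m := by omega
    obtain ⟨n', rfl⟩ : ∃ n', n = n' + 1 := ⟨n - 1, by omega⟩
    rw [walkB]
    subst hd
    simp only [hy, if_pos, lt_irrefl, if_neg, not_false_iff]
    rw [PySem.List.pyRange_one_singleton]
    have hb := days_in_month_bounds y m
    by_cases hm : m < 12
    · simp only [if_pos hm]
      rw [walkB_stable n' e y (m + 1) 1 (by unfold wMeasure at *; omega)]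
      simp
    · simp only [if_neg hm]
      rw [walkB_stable n' e (y + 1) 1 1 (by unfold wMeasure at *; omega)]
      simp
  | succ k ih =>
    intro d n h1 h2 hk hn
    have hd : d < days_in_month y m := by omega
    obtain ⟨n', rfl⟩ : ∃ n', n = n' + 1 := ⟨n - 1, by omega⟩
    rw [walkB]
    simp only [hy, if_pos, hd]
    have hb := days_in_month_bounds y m
    rw [walkB_stable n' e y m (d + 1) (by unfold wMeasure at *; omega)]
    rw [ih (d + 1) (n' + 1) (by omega) (by omega) (by omega) (by unfold wMeasure at *; omega)]
    rw [PySem.List.pyRange_one_cons (show d < days_in_month y m + 1 by omega)]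
    simp

-- the month-level walk: months m..12 of year y, then move to year y+1
set_option maxRecDepth 4096 in
theorem walk_month (e y : Int) (hy : y ≤ e) :
    ∀ k m n, 1 ≤ m → m ≤ 12 → (12 - m).toNat = k → wMeasure e y m 1 < n →
      walkB n e y m 1 =
        (PySem.List.pyRange m 13 1).flatMap (fun m' =>
          (PySem.List.pyRange 1 (days_in_month y m' + 1) 1).map (fmtDate y m')) ++
          walkB n e (y + 1) 1 1 := by
  intro k
  induction k with
  | zero =>
    intro m n h1 h2 hk hn
    have hm : m = 12 := by omega
    subst hm
    rw [walk_day e y 12 hy _ 1 n (by omega) (by have := days_in_month_bounds y 12; omega) rfl hn]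
    rw [show (13 : Int) = 12 + 1 from rfl, PySem.List.pyRange_one_singleton]
    simp
  | succ k ih =>
    intro m n h1 h2 hk hn
    have hm : m < 12 := by omega
    rw [walk_day e y m hy _ 1 n (by omega) (by have := days_in_month_bounds y m; omega) rfl hn]
    rw [if_pos hm, ih (m + 1) n (by omega) (by omega) (by omega) (by unfold wMeasure at *; omega)]
    rw [PySem.List.pyRange_one_cons (show m < 13 by omega)]
    simp

-- the year-level walk
set_option maxRecDepth 4096 in
theorem walk_year (e : Int) :
    ∀ k y n, (e + 1 - y).toNat = k → wMeasure e y 1 1 < n →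
      walkB n e y 1 1 =
        (PySem.List.pyRange y (e + 1) 1).flatMap (fun y' =>
          (PySem.List.pyRange 1 13 1).flatMap (fun m =>
            (PySem.List.pyRange 1 (days_in_month y' m + 1) 1).map (fmtDate y' m))) := by
  intro k
  induction k with
  | zero =>
    intro y n hk hn
    have hy : e < y := by omega
    obtain ⟨n', rfl⟩ : ∃ n', n = n' + 1 := ⟨n - 1, by omega⟩
    rw [walkB]
    simp only [if_neg (not_le.mpr hy)]
    rw [PySem.List.pyRange_one_eq_nil (show e + 1 ≤ y by omega)]
    simp
  | succ k ih =>
    intro y n hk hn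
    have hy : y ≤ e := by omega
    rw [walk_month e y hy _ 1 n (by omega) (by omega) rfl hn]
    rw [ih (y + 1) n (by omega) (by unfold wMeasure at *; omega)]
    rw [PySem.List.pyRange_one_cons (show y < e + 1 by omega)]
    simp

-- ===== VERDICT (by name: the statement is the Claim_ definition above) =====
theorem generate_birthday_dict_spec : Claim_equal_generate_birthday_dict := by
  intro s e _
  unfold Spec_generate_birthday_dict generate_birthday_dict_alt
  rw [A_eq, walk_year e (e + 1 - s).toNat s _ rfl (by unfold wMeasure; omega)]
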